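-- pv_equiv track=rewrite | github.com/ChiragNSundar/VibeLyrics | app/analysis/concept_rhymes.py | get_hip_hop_related
-- ===== SOURCE A (Python) =====
-- from typing import List, Dict, Set
--
-- HIP_HOP_CONCEPTS = {
--     "money": ["bands", "racks", "paper", "bread", "cake", "guap", "cheese", "dough", "green", "stacks", "bills", "cash", "bucks"],
--     "car": ["whip", "ride", "foreign", "lambo", "coupe", "drop", "vert", "beamer", "benz", "wraith"],
--     "gun": ["strap", "pole", "heat", "piece", "iron", "nine", "glock", "tool", "stick", "blick"],
--     "jewelry": ["ice", "drip", "chains", "rocks", "bling", "bust", "froze", "flooded", "piece"],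
--     "drugs": ["loud", "gas", "pack", "za", "percs", "lean", "drank", "mud", "syrup"],
--     "success": ["wins", "bags", "goals", "crown", "throne", "top", "peak", "wave", "glow"],
--     "king": ["throne", "crown", "reign", "kingdom", "royalty", "ruler", "majesty", "empire"],
--     "queen": ["throne", "crown", "reign", "royalty", "goddess", "empress", "majesty"],
--     "love": ["heart", "soul", "feelings", "emotions", "passion", "devotion", "affection"],
--     "enemy": ["opps", "haters", "snakes", "foes", "rivals", "fakes", "clowns"],
--     "friends": ["squad", "gang", "crew", "bros", "team", "circle", "fam", "homies"],
--     "home": ["hood", "block", "streets", "city", "town", "ends", "turf", "stomping grounds"],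
--     "woman": ["queen", "shawty", "shorty", "wifey", "lady", "dime", "goddess"],
--     "man": ["king", "dude", "bro", "homie", "player", "boss", "chief"],
--     "fight": ["beef", "war", "smoke", "static", "clash", "battle", "scrap"],
--     "police": ["cops", "laws", "feds", "12", "five-o", "pigs", "jakes"],
--     "prison": ["pen", "joint", "cage", "cell", "time", "bid", "locked"],
--     "rich": ["wealthy", "loaded", "paid", "ballin", "blessed", "set", "eatin"],
--     "poor": ["broke", "starving", "struggling", "hungry", "down", "low"],
--     "death": ["grave", "coffin", "rip", "gone", "departed", "fallen", "lost"],
--     "life": ["living", "breathing", "existing", "journey", "path", "story"],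
-- }
--
-- def get_hip_hop_related(word: str) -> Set[str]:
--     """Get hip-hop culture related words"""
--     related = set()
--     word_lower = word.lower()
--
--     # Direct lookup
--     if word_lower in HIP_HOP_CONCEPTS:
--         related.update(HIP_HOP_CONCEPTS[word_lower])
--
--     # Reverse lookup (find categories containing this word)
--     for category, words in HIP_HOP_CONCEPTS.items():
--         if word_lower in words:
--             related.add(category)
--             related.update(words)
--
--     return related
-- ===== SOURCE B (Python) =====
-- from typing import Set
--
-- # Concept table stored as compact "category:word,word,..." lines, parsed once at import time.
-- _CONCEPT_DATA = [
--     "money:bands,racks,paper,bread,cake,guap,cheese,dough,green,stacks,bills,cash,bucks",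
--     "car:whip,ride,foreign,lambo,coupe,drop,vert,beamer,benz,wraith",
--     "gun:strap,pole,heat,piece,iron,nine,glock,tool,stick,blick",
--     "jewelry:ice,drip,chains,rocks,bling,bust,froze,flooded,piece",
--     "drugs:loud,gas,pack,za,percs,lean,drank,mud,syrup",
--     "success:wins,bags,goals,crown,throne,top,peak,wave,glow",
--     "king:throne,crown,reign,kingdom,royalty,ruler,majesty,empire",
--     "queen:throne,crown,reign,royalty,goddess,empress,majesty",
--     "love:heart,soul,feelings,emotions,passion,devotion,affection",
--     "enemy:opps,haters,snakes,foes,rivals,fakes,clowns",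
--     "friends:squad,gang,crew,bros,team,circle,fam,homies",
--     "home:hood,block,streets,city,town,ends,turf,stomping grounds",
--     "woman:queen,shawty,shorty,wifey,lady,dime,goddess",
--     "man:king,dude,bro,homie,player,boss,chief",
--     "fight:beef,war,smoke,static,clash,battle,scrap",
--     "police:cops,laws,feds,12,five-o,pigs,jakes",
--     "prison:pen,joint,cage,cell,time,bid,locked",
--     "rich:wealthy,loaded,paid,ballin,blessed,set,eatin",
--     "poor:broke,starving,struggling,hungry,down,low",
--     "death:grave,coffin,rip,gone,departed,fallen,lost",
--     "life:living,breathing,existing,journey,path,story"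
-- ]
--
--
-- def _parse(entries):
--     pairs = []
--     for entry in entries:
--         cat, words = entry.split(":")
--         pairs.append((cat, words.split(",")))
--     return pairs
--
--
-- def _build_index(pairs):
--     index = {}
--     for cat, words in pairs:
--         index.setdefault(cat, set()).update(words)
--     for cat, words in pairs:
--         for w in words:
--             s = index.setdefault(w, set())
--             s.add(cat)
--             s.update(words)
--     return index
--
--
-- _INDEX = _build_index(_parse(_CONCEPT_DATA))
--
--
-- def get_hip_hop_related(word: str) -> Set[str]:
--     """Get hip-hop culture related words"""
--     return set(_INDEX.get(word.lower(), ()))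
-- ===== Notes on version B (the rewrite author's own statement) =====
-- stated objective: alternative
-- what changed: B stores the concept table as compact category:word,... text lines parsed once at import, builds an inverted index mapping every token to its full related set, and answers each call with a single dict lookup copied into a fresh set, instead of A's per-call scan over all 21 categories.
import Mathlib
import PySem

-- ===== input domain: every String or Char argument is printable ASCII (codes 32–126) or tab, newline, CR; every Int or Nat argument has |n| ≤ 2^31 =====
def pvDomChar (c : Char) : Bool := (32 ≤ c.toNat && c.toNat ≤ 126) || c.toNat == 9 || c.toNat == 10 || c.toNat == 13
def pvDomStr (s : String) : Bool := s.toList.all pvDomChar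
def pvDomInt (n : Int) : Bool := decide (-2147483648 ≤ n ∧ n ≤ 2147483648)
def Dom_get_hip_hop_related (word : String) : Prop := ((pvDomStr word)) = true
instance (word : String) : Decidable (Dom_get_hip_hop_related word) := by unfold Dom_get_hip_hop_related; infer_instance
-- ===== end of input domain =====

-- B stores the concept table as compact text lines parsed once at load into pairs, builds an
-- inverted index (token -> related set), and answers each call with a single dict lookup.

-- ===== PORT A =====
def HIP_HOP_CONCEPTS : PySem.Dict String (List String) := PySem.Dict.ofList
[   ("money", ["bands", "racks", "paper", "bread", "cake", "guap", "cheese", "dough", "green", "stacks", "bills", "cash", "bucks"]),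
  ("car", ["whip", "ride", "foreign", "lambo", "coupe", "drop", "vert", "beamer", "benz", "wraith"]),
  ("gun", ["strap", "pole", "heat", "piece", "iron", "nine", "glock", "tool", "stick", "blick"]),
  ("jewelry", ["ice", "drip", "chains", "rocks", "bling", "bust", "froze", "flooded", "piece"]),
  ("drugs", ["loud", "gas", "pack", "za", "percs", "lean", "drank", "mud", "syrup"]),
  ("success", ["wins", "bags", "goals", "crown", "throne", "top", "peak", "wave", "glow"]),
  ("king", ["throne", "crown", "reign", "kingdom", "royalty", "ruler", "majesty", "empire"]),
  ("queen", ["throne", "crown", "reign", "royalty", "goddess", "empress", "majesty"]),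
  ("love", ["heart", "soul", "feelings", "emotions", "passion", "devotion", "affection"]),
  ("enemy", ["opps", "haters", "snakes", "foes", "rivals", "fakes", "clowns"]),
  ("friends", ["squad", "gang", "crew", "bros", "team", "circle", "fam", "homies"]),
  ("home", ["hood", "block", "streets", "city", "town", "ends", "turf", "stomping grounds"]),
  ("woman", ["queen", "shawty", "shorty", "wifey", "lady", "dime", "goddess"]),
  ("man", ["king", "dude", "bro", "homie", "player", "boss", "chief"]),
  ("fight", ["beef", "war", "smoke", "static", "clash", "battle", "scrap"]),
  ("police", ["cops", "laws", "feds", "12", "five-o", "pigs", "jakes"]),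
  ("prison", ["pen", "joint", "cage", "cell", "time", "bid", "locked"]),
  ("rich", ["wealthy", "loaded", "paid", "ballin", "blessed", "set", "eatin"]),
  ("poor", ["broke", "starving", "struggling", "hungry", "down", "low"]),
  ("death", ["grave", "coffin", "rip", "gone", "departed", "fallen", "lost"]),
  ("life", ["living", "breathing", "existing", "journey", "path", "story"]) ]

def get_hip_hop_related (word : String) : List String :=
  let related : PySem.Set String := PySem.Set.empty
  let word_lower := PySem.Str.lower word
  -- Direct lookup
  let related := if HIP_HOP_CONCEPTS.contains word_lower then
      PySem.Set.update related (HIP_HOP_CONCEPTS.getD word_lower []) else related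
  -- Reverse lookup (find categories containing this word)
  HIP_HOP_CONCEPTS.items.foldl (fun rel p =>
    if p.2.contains word_lower then PySem.Set.update (PySem.Set.add rel p.1) p.2 else rel) related

-- ===== PORT B =====
def pvConceptData : List String := [
  "money:bands,racks,paper,bread,cake,guap,cheese,dough,green,stacks,bills,cash,bucks",
  "car:whip,ride,foreign,lambo,coupe,drop,vert,beamer,benz,wraith",
  "gun:strap,pole,heat,piece,iron,nine,glock,tool,stick,blick",
  "jewelry:ice,drip,chains,rocks,bling,bust,froze,flooded,piece",
  "drugs:loud,gas,pack,za,percs,lean,drank,mud,syrup",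
  "success:wins,bags,goals,crown,throne,top,peak,wave,glow",
  "king:throne,crown,reign,kingdom,royalty,ruler,majesty,empire",
  "queen:throne,crown,reign,royalty,goddess,empress,majesty",
  "love:heart,soul,feelings,emotions,passion,devotion,affection",
  "enemy:opps,haters,snakes,foes,rivals,fakes,clowns",
  "friends:squad,gang,crew,bros,team,circle,fam,homies",
  "home:hood,block,streets,city,town,ends,turf,stomping grounds",
  "woman:queen,shawty,shorty,wifey,lady,dime,goddess",
  "man:king,dude,bro,homie,player,boss,chief",
  "fight:beef,war,smoke,static,clash,battle,scrap",
  "police:cops,laws,feds,12,five-o,pigs,jakes",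
  "prison:pen,joint,cage,cell,time,bid,locked",
  "rich:wealthy,loaded,paid,ballin,blessed,set,eatin",
  "poor:broke,starving,struggling,hungry,down,low",
  "death:grave,coffin,rip,gone,departed,fallen,lost",
  "life:living,breathing,existing,journey,path,story" ]

-- Source B _parse: each entry splits on ":" into exactly two parts, so the Python unpacking
-- 'cat, words = entry.split(":")' is ported as parts[0] / parts[1] (getD; exact on this data).
-- split? is none only for an empty separator, so getD [] is exact.
def pvParse (entries : List String) : List (String × List String) :=
  entries.foldl (fun pairs entry =>
    let parts := (PySem.Str.split? entry ":").getD []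
    pairs ++ [(parts.getD 0 "", (PySem.Str.split? (parts.getD 1 "") ",").getD [])]) []

-- Source B _build_index: setdefault(k, set()).update / .add ported as Dict.modify with Set.empty default
def pvBuildIndex (pairs : List (String × List String)) : PySem.Dict String (PySem.Set String) :=
  let index := pairs.foldl (fun d p =>
      d.modify p.1 PySem.Set.empty (fun s => PySem.Set.update s p.2)) PySem.Dict.empty
  pairs.foldl (fun d p =>
      p.2.foldl (fun d w =>
        d.modify w PySem.Set.empty (fun s => PySem.Set.update (PySem.Set.add s p.1) p.2)) d) index

def pvIndex : PySem.Dict String (PySem.Set String) := pvBuildIndex (pvParse pvConceptData)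

def get_hip_hop_related_alt (word : String) : List String :=
  PySem.Set.ofList (pvIndex.getD (PySem.Str.lower word) PySem.Set.empty)

-- ===== PRECONDITION & SPEC =====
def Spec_get_hip_hop_related (word : String) (out : List String) : Prop := out = get_hip_hop_related_alt word
instance (word : String) (out : List String) : Decidable (Spec_get_hip_hop_related word out) := by unfold Spec_get_hip_hop_related; infer_instance

-- ===== CLAIM (what is proved, stated in full; the proofs are below) =====
def Claim_equal_get_hip_hop_related : Prop := ∀ (word : String), Dom_get_hip_hop_related word → Spec_get_hip_hop_related word (get_hip_hop_related word)

-- ===== LEMMAS AND PROOFS =====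

-- A's body as a function of the lowered word
def pvCoreA (t : String) : List String :=
  let related : PySem.Set String := PySem.Set.empty
  let related := if HIP_HOP_CONCEPTS.contains t then
      PySem.Set.update related (HIP_HOP_CONCEPTS.getD t []) else related
  HIP_HOP_CONCEPTS.items.foldl (fun rel p =>
    if p.2.contains t then PySem.Set.update (PySem.Set.add rel p.1) p.2 else rel) related

-- the value of pvIndex, written out once so each evaluation in `decide` is a cheap lookup
def pvIndexLit : PySem.Dict String (PySem.Set String) := PySem.Dict.ofList
[   ("money", ["bands", "racks", "paper", "bread", "cake", "guap", "cheese", "dough", "green", "stacks", "bills", "cash", "bucks"]),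
  ("car", ["whip", "ride", "foreign", "lambo", "coupe", "drop", "vert", "beamer", "benz", "wraith"]),
  ("gun", ["strap", "pole", "heat", "piece", "iron", "nine", "glock", "tool", "stick", "blick"]),
  ("jewelry", ["ice", "drip", "chains", "rocks", "bling", "bust", "froze", "flooded", "piece"]),
  ("drugs", ["loud", "gas", "pack", "za", "percs", "lean", "drank", "mud", "syrup"]),
  ("success", ["wins", "bags", "goals", "crown", "throne", "top", "peak", "wave", "glow"]),
  ("king", ["throne", "crown", "reign", "kingdom", "royalty", "ruler", "majesty", "empire", "man", "king", "dude", "bro", "homie", "player", "boss", "chief"]),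
  ("queen", ["throne", "crown", "reign", "royalty", "goddess", "empress", "majesty", "woman", "queen", "shawty", "shorty", "wifey", "lady", "dime"]),
  ("love", ["heart", "soul", "feelings", "emotions", "passion", "devotion", "affection"]),
  ("enemy", ["opps", "haters", "snakes", "foes", "rivals", "fakes", "clowns"]),
  ("friends", ["squad", "gang", "crew", "bros", "team", "circle", "fam", "homies"]),
  ("home", ["hood", "block", "streets", "city", "town", "ends", "turf", "stomping grounds"]),
  ("woman", ["queen", "shawty", "shorty", "wifey", "lady", "dime", "goddess"]),
  ("man", ["king", "dude", "bro", "homie", "player", "boss", "chief"]),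
  ("fight", ["beef", "war", "smoke", "static", "clash", "battle", "scrap"]),
  ("police", ["cops", "laws", "feds", "12", "five-o", "pigs", "jakes"]),
  ("prison", ["pen", "joint", "cage", "cell", "time", "bid", "locked"]),
  ("rich", ["wealthy", "loaded", "paid", "ballin", "blessed", "set", "eatin"]),
  ("poor", ["broke", "starving", "struggling", "hungry", "down", "low"]),
  ("death", ["grave", "coffin", "rip", "gone", "departed", "fallen", "lost"]),
  ("life", ["living", "breathing", "existing", "journey", "path", "story"]),
  ("bands", ["money", "bands", "racks", "paper", "bread", "cake", "guap", "cheese", "dough", "green", "stacks", "bills", "cash", "bucks"]),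
  ("racks", ["money", "bands", "racks", "paper", "bread", "cake", "guap", "cheese", "dough", "green", "stacks", "bills", "cash", "bucks"]),
  ("paper", ["money", "bands", "racks", "paper", "bread", "cake", "guap", "cheese", "dough", "green", "stacks", "bills", "cash", "bucks"]),
  ("bread", ["money", "bands", "racks", "paper", "bread", "cake", "guap", "cheese", "dough", "green", "stacks", "bills", "cash", "bucks"]),
  ("cake", ["money", "bands", "racks", "paper", "bread", "cake", "guap", "cheese", "dough", "green", "stacks", "bills", "cash", "bucks"]),
  ("guap", ["money", "bands", "racks", "paper", "bread", "cake", "guap", "cheese", "dough", "green", "stacks", "bills", "cash", "bucks"]),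
  ("cheese", ["money", "bands", "racks", "paper", "bread", "cake", "guap", "cheese", "dough", "green", "stacks", "bills", "cash", "bucks"]),
  ("dough", ["money", "bands", "racks", "paper", "bread", "cake", "guap", "cheese", "dough", "green", "stacks", "bills", "cash", "bucks"]),
  ("green", ["money", "bands", "racks", "paper", "bread", "cake", "guap", "cheese", "dough", "green", "stacks", "bills", "cash", "bucks"]),
  ("stacks", ["money", "bands", "racks", "paper", "bread", "cake", "guap", "cheese", "dough", "green", "stacks", "bills", "cash", "bucks"]),
  ("bills", ["money", "bands", "racks", "paper", "bread", "cake", "guap", "cheese", "dough", "green", "stacks", "bills", "cash", "bucks"]),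
  ("cash", ["money", "bands", "racks", "paper", "bread", "cake", "guap", "cheese", "dough", "green", "stacks", "bills", "cash", "bucks"]),
  ("bucks", ["money", "bands", "racks", "paper", "bread", "cake", "guap", "cheese", "dough", "green", "stacks", "bills", "cash", "bucks"]),
  ("whip", ["car", "whip", "ride", "foreign", "lambo", "coupe", "drop", "vert", "beamer", "benz", "wraith"]),
  ("ride", ["car", "whip", "ride", "foreign", "lambo", "coupe", "drop", "vert", "beamer", "benz", "wraith"]),
  ("foreign", ["car", "whip", "ride", "foreign", "lambo", "coupe", "drop", "vert", "beamer", "benz", "wraith"]),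
  ("lambo", ["car", "whip", "ride", "foreign", "lambo", "coupe", "drop", "vert", "beamer", "benz", "wraith"]),
  ("coupe", ["car", "whip", "ride", "foreign", "lambo", "coupe", "drop", "vert", "beamer", "benz", "wraith"]),
  ("drop", ["car", "whip", "ride", "foreign", "lambo", "coupe", "drop", "vert", "beamer", "benz", "wraith"]),
  ("vert", ["car", "whip", "ride", "foreign", "lambo", "coupe", "drop", "vert", "beamer", "benz", "wraith"]),
  ("beamer", ["car", "whip", "ride", "foreign", "lambo", "coupe", "drop", "vert", "beamer", "benz", "wraith"]),
  ("benz", ["car", "whip", "ride", "foreign", "lambo", "coupe", "drop", "vert", "beamer", "benz", "wraith"]),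
  ("wraith", ["car", "whip", "ride", "foreign", "lambo", "coupe", "drop", "vert", "beamer", "benz", "wraith"]),
  ("strap", ["gun", "strap", "pole", "heat", "piece", "iron", "nine", "glock", "tool", "stick", "blick"]),
  ("pole", ["gun", "strap", "pole", "heat", "piece", "iron", "nine", "glock", "tool", "stick", "blick"]),
  ("heat", ["gun", "strap", "pole", "heat", "piece", "iron", "nine", "glock", "tool", "stick", "blick"]),
  ("piece", ["gun", "strap", "pole", "heat", "piece", "iron", "nine", "glock", "tool", "stick", "blick", "jewelry", "ice", "drip", "chains", "rocks", "bling", "bust", "froze", "flooded"]),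
  ("iron", ["gun", "strap", "pole", "heat", "piece", "iron", "nine", "glock", "tool", "stick", "blick"]),
  ("nine", ["gun", "strap", "pole", "heat", "piece", "iron", "nine", "glock", "tool", "stick", "blick"]),
  ("glock", ["gun", "strap", "pole", "heat", "piece", "iron", "nine", "glock", "tool", "stick", "blick"]),
  ("tool", ["gun", "strap", "pole", "heat", "piece", "iron", "nine", "glock", "tool", "stick", "blick"]),
  ("stick", ["gun", "strap", "pole", "heat", "piece", "iron", "nine", "glock", "tool", "stick", "blick"]),
  ("blick", ["gun", "strap", "pole", "heat", "piece", "iron", "nine", "glock", "tool", "stick", "blick"]),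
  ("ice", ["jewelry", "ice", "drip", "chains", "rocks", "bling", "bust", "froze", "flooded", "piece"]),
  ("drip", ["jewelry", "ice", "drip", "chains", "rocks", "bling", "bust", "froze", "flooded", "piece"]),
  ("chains", ["jewelry", "ice", "drip", "chains", "rocks", "bling", "bust", "froze", "flooded", "piece"]),
  ("rocks", ["jewelry", "ice", "drip", "chains", "rocks", "bling", "bust", "froze", "flooded", "piece"]),
  ("bling", ["jewelry", "ice", "drip", "chains", "rocks", "bling", "bust", "froze", "flooded", "piece"]),
  ("bust", ["jewelry", "ice", "drip", "chains", "rocks", "bling", "bust", "froze", "flooded", "piece"]),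
  ("froze", ["jewelry", "ice", "drip", "chains", "rocks", "bling", "bust", "froze", "flooded", "piece"]),
  ("flooded", ["jewelry", "ice", "drip", "chains", "rocks", "bling", "bust", "froze", "flooded", "piece"]),
  ("loud", ["drugs", "loud", "gas", "pack", "za", "percs", "lean", "drank", "mud", "syrup"]),
  ("gas", ["drugs", "loud", "gas", "pack", "za", "percs", "lean", "drank", "mud", "syrup"]),
  ("pack", ["drugs", "loud", "gas", "pack", "za", "percs", "lean", "drank", "mud", "syrup"]),
  ("za", ["drugs", "loud", "gas", "pack", "za", "percs", "lean", "drank", "mud", "syrup"]),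
  ("percs", ["drugs", "loud", "gas", "pack", "za", "percs", "lean", "drank", "mud", "syrup"]),
  ("lean", ["drugs", "loud", "gas", "pack", "za", "percs", "lean", "drank", "mud", "syrup"]),
  ("drank", ["drugs", "loud", "gas", "pack", "za", "percs", "lean", "drank", "mud", "syrup"]),
  ("mud", ["drugs", "loud", "gas", "pack", "za", "percs", "lean", "drank", "mud", "syrup"]),
  ("syrup", ["drugs", "loud", "gas", "pack", "za", "percs", "lean", "drank", "mud", "syrup"]),
  ("wins", ["success", "wins", "bags", "goals", "crown", "throne", "top", "peak", "wave", "glow"]),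
  ("bags", ["success", "wins", "bags", "goals", "crown", "throne", "top", "peak", "wave", "glow"]),
  ("goals", ["success", "wins", "bags", "goals", "crown", "throne", "top", "peak", "wave", "glow"]),
  ("crown", ["success", "wins", "bags", "goals", "crown", "throne", "top", "peak", "wave", "glow", "king", "reign", "kingdom", "royalty", "ruler", "majesty", "empire", "queen", "goddess", "empress"]),
  ("throne", ["success", "wins", "bags", "goals", "crown", "throne", "top", "peak", "wave", "glow", "king", "reign", "kingdom", "royalty", "ruler", "majesty", "empire", "queen", "goddess", "empress"]),
  ("top", ["success", "wins", "bags", "goals", "crown", "throne", "top", "peak", "wave", "glow"]),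
  ("peak", ["success", "wins", "bags", "goals", "crown", "throne", "top", "peak", "wave", "glow"]),
  ("wave", ["success", "wins", "bags", "goals", "crown", "throne", "top", "peak", "wave", "glow"]),
  ("glow", ["success", "wins", "bags", "goals", "crown", "throne", "top", "peak", "wave", "glow"]),
  ("reign", ["king", "throne", "crown", "reign", "kingdom", "royalty", "ruler", "majesty", "empire", "queen", "goddess", "empress"]),
  ("kingdom", ["king", "throne", "crown", "reign", "kingdom", "royalty", "ruler", "majesty", "empire"]),
  ("royalty", ["king", "throne", "crown", "reign", "kingdom", "royalty", "ruler", "majesty", "empire", "queen", "goddess", "empress"]),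
  ("ruler", ["king", "throne", "crown", "reign", "kingdom", "royalty", "ruler", "majesty", "empire"]),
  ("majesty", ["king", "throne", "crown", "reign", "kingdom", "royalty", "ruler", "majesty", "empire", "queen", "goddess", "empress"]),
  ("empire", ["king", "throne", "crown", "reign", "kingdom", "royalty", "ruler", "majesty", "empire"]),
  ("goddess", ["queen", "throne", "crown", "reign", "royalty", "goddess", "empress", "majesty", "woman", "shawty", "shorty", "wifey", "lady", "dime"]),
  ("empress", ["queen", "throne", "crown", "reign", "royalty", "goddess", "empress", "majesty"]),
  ("heart", ["love", "heart", "soul", "feelings", "emotions", "passion", "devotion", "affection"]),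
  ("soul", ["love", "heart", "soul", "feelings", "emotions", "passion", "devotion", "affection"]),
  ("feelings", ["love", "heart", "soul", "feelings", "emotions", "passion", "devotion", "affection"]),
  ("emotions", ["love", "heart", "soul", "feelings", "emotions", "passion", "devotion", "affection"]),
  ("passion", ["love", "heart", "soul", "feelings", "emotions", "passion", "devotion", "affection"]),
  ("devotion", ["love", "heart", "soul", "feelings", "emotions", "passion", "devotion", "affection"]),
  ("affection", ["love", "heart", "soul", "feelings", "emotions", "passion", "devotion", "affection"]),
  ("opps", ["enemy", "opps", "haters", "snakes", "foes", "rivals", "fakes", "clowns"]),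
  ("haters", ["enemy", "opps", "haters", "snakes", "foes", "rivals", "fakes", "clowns"]),
  ("snakes", ["enemy", "opps", "haters", "snakes", "foes", "rivals", "fakes", "clowns"]),
  ("foes", ["enemy", "opps", "haters", "snakes", "foes", "rivals", "fakes", "clowns"]),
  ("rivals", ["enemy", "opps", "haters", "snakes", "foes", "rivals", "fakes", "clowns"]),
  ("fakes", ["enemy", "opps", "haters", "snakes", "foes", "rivals", "fakes", "clowns"]),
  ("clowns", ["enemy", "opps", "haters", "snakes", "foes", "rivals", "fakes", "clowns"]),
  ("squad", ["friends", "squad", "gang", "crew", "bros", "team", "circle", "fam", "homies"]),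
  ("gang", ["friends", "squad", "gang", "crew", "bros", "team", "circle", "fam", "homies"]),
  ("crew", ["friends", "squad", "gang", "crew", "bros", "team", "circle", "fam", "homies"]),
  ("bros", ["friends", "squad", "gang", "crew", "bros", "team", "circle", "fam", "homies"]),
  ("team", ["friends", "squad", "gang", "crew", "bros", "team", "circle", "fam", "homies"]),
  ("circle", ["friends", "squad", "gang", "crew", "bros", "team", "circle", "fam", "homies"]),
  ("fam", ["friends", "squad", "gang", "crew", "bros", "team", "circle", "fam", "homies"]),
  ("homies", ["friends", "squad", "gang", "crew", "bros", "team", "circle", "fam", "homies"]),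
  ("hood", ["home", "hood", "block", "streets", "city", "town", "ends", "turf", "stomping grounds"]),
  ("block", ["home", "hood", "block", "streets", "city", "town", "ends", "turf", "stomping grounds"]),
  ("streets", ["home", "hood", "block", "streets", "city", "town", "ends", "turf", "stomping grounds"]),
  ("city", ["home", "hood", "block", "streets", "city", "town", "ends", "turf", "stomping grounds"]),
  ("town", ["home", "hood", "block", "streets", "city", "town", "ends", "turf", "stomping grounds"]),
  ("ends", ["home", "hood", "block", "streets", "city", "town", "ends", "turf", "stomping grounds"]),
  ("turf", ["home", "hood", "block", "streets", "city", "town", "ends", "turf", "stomping grounds"]),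
  ("stomping grounds", ["home", "hood", "block", "streets", "city", "town", "ends", "turf", "stomping grounds"]),
  ("shawty", ["woman", "queen", "shawty", "shorty", "wifey", "lady", "dime", "goddess"]),
  ("shorty", ["woman", "queen", "shawty", "shorty", "wifey", "lady", "dime", "goddess"]),
  ("wifey", ["woman", "queen", "shawty", "shorty", "wifey", "lady", "dime", "goddess"]),
  ("lady", ["woman", "queen", "shawty", "shorty", "wifey", "lady", "dime", "goddess"]),
  ("dime", ["woman", "queen", "shawty", "shorty", "wifey", "lady", "dime", "goddess"]),
  ("dude", ["man", "king", "dude", "bro", "homie", "player", "boss", "chief"]),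
  ("bro", ["man", "king", "dude", "bro", "homie", "player", "boss", "chief"]),
  ("homie", ["man", "king", "dude", "bro", "homie", "player", "boss", "chief"]),
  ("player", ["man", "king", "dude", "bro", "homie", "player", "boss", "chief"]),
  ("boss", ["man", "king", "dude", "bro", "homie", "player", "boss", "chief"]),
  ("chief", ["man", "king", "dude", "bro", "homie", "player", "boss", "chief"]),
  ("beef", ["fight", "beef", "war", "smoke", "static", "clash", "battle", "scrap"]),
  ("war", ["fight", "beef", "war", "smoke", "static", "clash", "battle", "scrap"]),
  ("smoke", ["fight", "beef", "war", "smoke", "static", "clash", "battle", "scrap"]),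
  ("static", ["fight", "beef", "war", "smoke", "static", "clash", "battle", "scrap"]),
  ("clash", ["fight", "beef", "war", "smoke", "static", "clash", "battle", "scrap"]),
  ("battle", ["fight", "beef", "war", "smoke", "static", "clash", "battle", "scrap"]),
  ("scrap", ["fight", "beef", "war", "smoke", "static", "clash", "battle", "scrap"]),
  ("cops", ["police", "cops", "laws", "feds", "12", "five-o", "pigs", "jakes"]),
  ("laws", ["police", "cops", "laws", "feds", "12", "five-o", "pigs", "jakes"]),
  ("feds", ["police", "cops", "laws", "feds", "12", "five-o", "pigs", "jakes"]),
  ("12", ["police", "cops", "laws", "feds", "12", "five-o", "pigs", "jakes"]),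
  ("five-o", ["police", "cops", "laws", "feds", "12", "five-o", "pigs", "jakes"]),
  ("pigs", ["police", "cops", "laws", "feds", "12", "five-o", "pigs", "jakes"]),
  ("jakes", ["police", "cops", "laws", "feds", "12", "five-o", "pigs", "jakes"]),
  ("pen", ["prison", "pen", "joint", "cage", "cell", "time", "bid", "locked"]),
  ("joint", ["prison", "pen", "joint", "cage", "cell", "time", "bid", "locked"]),
  ("cage", ["prison", "pen", "joint", "cage", "cell", "time", "bid", "locked"]),
  ("cell", ["prison", "pen", "joint", "cage", "cell", "time", "bid", "locked"]),
  ("time", ["prison", "pen", "joint", "cage", "cell", "time", "bid", "locked"]),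
  ("bid", ["prison", "pen", "joint", "cage", "cell", "time", "bid", "locked"]),
  ("locked", ["prison", "pen", "joint", "cage", "cell", "time", "bid", "locked"]),
  ("wealthy", ["rich", "wealthy", "loaded", "paid", "ballin", "blessed", "set", "eatin"]),
  ("loaded", ["rich", "wealthy", "loaded", "paid", "ballin", "blessed", "set", "eatin"]),
  ("paid", ["rich", "wealthy", "loaded", "paid", "ballin", "blessed", "set", "eatin"]),
  ("ballin", ["rich", "wealthy", "loaded", "paid", "ballin", "blessed", "set", "eatin"]),
  ("blessed", ["rich", "wealthy", "loaded", "paid", "ballin", "blessed", "set", "eatin"]),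
  ("set", ["rich", "wealthy", "loaded", "paid", "ballin", "blessed", "set", "eatin"]),
  ("eatin", ["rich", "wealthy", "loaded", "paid", "ballin", "blessed", "set", "eatin"]),
  ("broke", ["poor", "broke", "starving", "struggling", "hungry", "down", "low"]),
  ("starving", ["poor", "broke", "starving", "struggling", "hungry", "down", "low"]),
  ("struggling", ["poor", "broke", "starving", "struggling", "hungry", "down", "low"]),
  ("hungry", ["poor", "broke", "starving", "struggling", "hungry", "down", "low"]),
  ("down", ["poor", "broke", "starving", "struggling", "hungry", "down", "low"]),
  ("low", ["poor", "broke", "starving", "struggling", "hungry", "down", "low"]),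
  ("grave", ["death", "grave", "coffin", "rip", "gone", "departed", "fallen", "lost"]),
  ("coffin", ["death", "grave", "coffin", "rip", "gone", "departed", "fallen", "lost"]),
  ("rip", ["death", "grave", "coffin", "rip", "gone", "departed", "fallen", "lost"]),
  ("gone", ["death", "grave", "coffin", "rip", "gone", "departed", "fallen", "lost"]),
  ("departed", ["death", "grave", "coffin", "rip", "gone", "departed", "fallen", "lost"]),
  ("fallen", ["death", "grave", "coffin", "rip", "gone", "departed", "fallen", "lost"]),
  ("lost", ["death", "grave", "coffin", "rip", "gone", "departed", "fallen", "lost"]),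
  ("living", ["life", "living", "breathing", "existing", "journey", "path", "story"]),
  ("breathing", ["life", "living", "breathing", "existing", "journey", "path", "story"]),
  ("existing", ["life", "living", "breathing", "existing", "journey", "path", "story"]),
  ("journey", ["life", "living", "breathing", "existing", "journey", "path", "story"]),
  ("path", ["life", "living", "breathing", "existing", "journey", "path", "story"]),
  ("story", ["life", "living", "breathing", "existing", "journey", "path", "story"]) ]

-- every key or value token of the table
def pvTokens : List String :=
  HIP_HOP_CONCEPTS.keys ++ HIP_HOP_CONCEPTS.items.flatMap (fun p => p.2)

theorem pvA_core (w : String) : get_hip_hop_related w = pvCoreA (PySem.Str.lower w) := rfl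

theorem pvAlt_core (w : String) :
    get_hip_hop_related_alt w = PySem.Set.ofList (pvIndex.getD (PySem.Str.lower w) PySem.Set.empty) := rfl

set_option maxRecDepth 1000000 in
set_option maxHeartbeats 1000000 in
theorem pvParse_eq : pvParse pvConceptData = HIP_HOP_CONCEPTS.items := by decide

set_option maxRecDepth 1000000 in
set_option maxHeartbeats 2000000 in
theorem pvBuild_eq : pvBuildIndex HIP_HOP_CONCEPTS.items = pvIndexLit := by decide

theorem pvIndex_eq : pvIndex = pvIndexLit := by
  unfold pvIndex; rw [pvParse_eq]; exact pvBuild_eq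

set_option maxRecDepth 100000 in
theorem pvIn_case : ∀ t ∈ pvTokens, pvCoreA t = PySem.Set.ofList (pvIndexLit.getD t PySem.Set.empty) := by decide

set_option maxRecDepth 100000 in
theorem pvKeysB : ∀ k ∈ pvIndexLit.keys, k ∈ pvTokens := by decide

theorem pvValsA : ∀ p ∈ HIP_HOP_CONCEPTS.items, ∀ w ∈ p.2, w ∈ pvTokens :=
  fun p hp _ hw => List.mem_append_right _ (List.mem_flatMap.mpr ⟨p, hp, hw⟩)

theorem pvOutA (t : String) (h : t ∉ pvTokens) : pvCoreA t = [] := by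
  have hk : t ∉ HIP_HOP_CONCEPTS.keys := fun hm => h (List.mem_append_left _ hm)
  have hc : HIP_HOP_CONCEPTS.contains t = false := by
    rw [PySem.Dict.contains_eq_decide_mem_keys]; simp [hk]
  unfold pvCoreA
  rw [hc]
  simp only [Bool.false_eq_true, if_false]
  rw [PySem.List.foldl_congr_mem (g := fun rel _ => rel)]
  · induction HIP_HOP_CONCEPTS.items with
    | nil => rfl
    | cons p rest ih => simpa using ih
  · intro acc p hp
    have hw : t ∉ p.2 := fun hm => h (pvValsA p hp t hm)
    simp [hw]

theorem pvOutB (t : String) (h : t ∉ pvTokens) :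
    PySem.Set.ofList (pvIndexLit.getD t PySem.Set.empty) = [] := by
  have hk : t ∉ pvIndexLit.keys := fun hm => h (pvKeysB t hm)
  have hc : pvIndexLit.contains t = false := by
    rw [PySem.Dict.contains_eq_decide_mem_keys]; simp [hk]
  have hg : pvIndexLit.get? t = none := by
    rw [PySem.Dict.get?_eq_none_iff_contains, hc]
  simp [PySem.Dict.getD, hg, PySem.Set.ofList, PySem.Set.empty]

-- ===== VERDICT (by name: the statement is the Claim_ definition above) =====
theorem get_hip_hop_related_spec : Claim_equal_get_hip_hop_related := by
  intro w _hdom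
  unfold Spec_get_hip_hop_related
  rw [pvA_core, pvAlt_core, pvIndex_eq]
  generalize PySem.Str.lower w = t
  by_cases h : t ∈ pvTokens
  · exact pvIn_case t h
  · rw [pvOutA t h, pvOutB t h]
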